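-- pv_equiv track=rewrite | github.com/RiddhiPatil15/Python-DSA | Autobiographical.py | autobiographical
-- ===== SOURCE A (Python) =====
-- def autobiographical(num: str) -> bool:
--     n = len(num)
--     count = [0]*n
--     for ch in num:
--         d = int(ch)
--         if d>= n:
--             return False
--         count[d] += 1
--     for i in range(n):
--         if int(num[i]) != count[i]:
--             return False
--     return True
-- ===== SOURCE B (Python) =====
-- def autobiographical(num: str) -> bool:
--     # simpler: no count table; verify each position by re-counting on the fly
--     return all(int(c) == sum(d == str(i) for d in num) for i, c in enumerate(num))
-- ===== Notes on version B (the rewrite author's own statement) =====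
-- stated objective: simpler
-- what changed: Replaced A's precomputed count table plus two early-exit loops with a single all(...) over enumerate(num) that re-counts each digit's occurrences on the fly; A's d>=n early return is subsumed because any digit >= len(num) makes its position's equality unsatisfiable.
import Mathlib
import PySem

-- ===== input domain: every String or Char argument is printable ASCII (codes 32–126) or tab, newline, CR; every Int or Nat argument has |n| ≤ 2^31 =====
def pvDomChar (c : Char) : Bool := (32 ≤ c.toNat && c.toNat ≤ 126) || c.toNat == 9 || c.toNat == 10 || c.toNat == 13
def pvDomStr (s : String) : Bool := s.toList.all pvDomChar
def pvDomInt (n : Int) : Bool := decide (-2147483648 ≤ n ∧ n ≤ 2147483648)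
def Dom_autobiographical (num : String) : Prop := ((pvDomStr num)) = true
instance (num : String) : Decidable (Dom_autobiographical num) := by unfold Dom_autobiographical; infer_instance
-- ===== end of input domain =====

-- B replaces A's count table and two early-exit loops with one all(...) that re-counts each
-- digit on the fly: simpler (shorter) code, not faster (O(n^2) vs A's O(n)).

-- ===== PORT A =====

-- int(ch) for a one-character string ch (shared int() primitive of both ports)
def pvVal? (c : Char) : Option Int := PySem.Int.ofChars? [c]

-- first loop of A: build the count table, early-returning False on d >= n;
-- `none` covers both the early `return False` and int(ch)'s ValueError — the latter
-- is unreachable inside Pre_ (a non-digit there is preceded by a digit ≥ n).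
def pvBuild (n : Int) : List Char → List Int → Option (List Int)
  | [], cnt => some cnt
  | c :: cs, cnt =>
    match pvVal? c with
    | none => none
    | some d =>
      if d ≥ n then none
      else pvBuild n cs (PySem.List.pySetD cnt d (PySem.List.pyGetD cnt d 0 + 1))

-- second loop of A: for i in range(n): if int(num[i]) != count[i]: return False
def pvCheck (cs : List Char) (cnt : List Int) : List Int → Bool
  | [] => true
  | i :: is =>
    if (pvVal? (PySem.List.pyGetD cs i ' ')).getD 0 ≠ PySem.List.pyGetD cnt i 0 then false
    else pvCheck cs cnt is

def autobiographical (num : String) : Bool :=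
  let cs := num.toList
  let n : Int := PySem.List.len cs
  match pvBuild n cs (PySem.List.pyRepeat [(0 : Int)] n) with
  | none => false
  | some cnt => pvCheck cs cnt (PySem.List.pyRange 0 n 1)

-- ===== PORT B =====
def autobiographical_alt (num : String) : Bool :=
  (PySem.List.enumerate num.toList 0).all fun ic =>
    (pvVal? ic.2).getD 0 ==
      (num.toList.map (fun d => if [d] = PySem.Int.toChars ic.1 then (1 : Int) else 0)).sum

-- ===== PRECONDITION & SPEC =====
-- Pre_ excludes exactly the inputs on which A raises ValueError in int(ch): those whose first
-- non-digit character is not preceded by a digit ≥ len(num) (A returns on every other input).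
def Pre_autobiographical (num : String) : Prop :=
  ∀ k < num.toList.length, PySem.Chars.isdigit (num.toList.getD k ' ') = false →
    ∃ j < k, PySem.Chars.isdigit (num.toList.getD j ' ') = true ∧
      (num.toList.length : Int) ≤ ((num.toList.getD j ' ').toNat : Int) - 48
instance (num : String) : Decidable (Pre_autobiographical num) := by
  unfold Pre_autobiographical; infer_instance

def pvWitness_autobiographical : String := "1210"

def Spec_autobiographical (num : String) (out : Bool) : Prop := out = autobiographical_alt num
instance (num : String) (out : Bool) : Decidable (Spec_autobiographical num out) := by unfold Spec_autobiographical; infer_instance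

-- ===== CLAIM (what is proved, stated in full; the proofs are below) =====
def Claim_equal_autobiographical : Prop := ∀ (num : String), Dom_autobiographical num → Pre_autobiographical num → Spec_autobiographical num (autobiographical num)

-- ===== LEMMAS AND PROOFS =====

-- char-level facts, proved by enumeration of the ASCII codes and lifted through Char.ofNat_toNat

theorem pv_char_enum : ∀ k < 128, pvVal? (Char.ofNat k) =
    (if PySem.Chars.isdigit (Char.ofNat k) then some (((Char.ofNat k).toNat : Int) - 48) else none) := by
  decide

theorem pv_val_of_dom {c : Char} (h : pvDomChar c = true) :
    pvVal? c = (if PySem.Chars.isdigit c then some ((c.toNat : Int) - 48) else none) := by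
  have hk : c.toNat < 128 := by
    simp [pvDomChar] at h; omega
  have := pv_char_enum c.toNat hk
  rwa [Char.ofNat_toNat] at this

theorem pv_digit_bounds {c : Char} (h : PySem.Chars.isdigit c = true) :
    48 ≤ c.toNat ∧ c.toNat ≤ 57 := by
  simp [PySem.Chars.isdigit, Char.le_def, UInt32.le_iff_toNat_le] at h
  exact h

theorem pv_toChars_enum : ∀ k : Nat, 48 ≤ k → k ≤ 57 → k < 128 →
    PySem.Int.toChars ((k : Int) - 48) = [Char.ofNat k] := by decide

-- str(i) of a digit character's value is that character again
theorem pv_toChars_digit {c : Char} (hc : c.toNat < 128) (h : PySem.Chars.isdigit c = true) :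
    PySem.Int.toChars ((c.toNat : Int) - 48) = [c] := by
  obtain ⟨h1, h2⟩ := pv_digit_bounds h
  have := pv_toChars_enum c.toNat h1 h2 hc
  rwa [Char.ofNat_toNat] at this

theorem pv_single_aux (i : Int) {c : Char} (h : PySem.Int.toChars i = [c])
    (key : PySem.Chars.isdigit ((PySem.Int.toChars i).headD ' ') = true ∧
      (((PySem.Int.toChars i).headD ' ').toNat : Int) - 48 = i) :
    PySem.Chars.isdigit c = true ∧ ((c.toNat : Int) - 48) = i := by
  rw [h] at key; simpa using key

-- a one-character str(i) forces 0 ≤ i ≤ 9 and pins the character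
theorem pv_toChars_single {i : Int} (h0 : 0 ≤ i) (h9 : i ≤ 9) {c : Char}
    (h : PySem.Int.toChars i = [c]) : PySem.Chars.isdigit c = true ∧ ((c.toNat : Int) - 48) = i := by
  interval_cases i <;> exact pv_single_aux _ h (by constructor <;> decide)

theorem pv_lenCore (b : Nat) : ∀ (f n : Nat) (l : List Char), l.length ≤ (Nat.toDigitsCore b f n l).length := by
  intro f
  induction f with
  | zero => intro n l; simp [Nat.toDigitsCore]
  | succ f ih =>
    intro n l
    simp only [Nat.toDigitsCore]
    split
    · simp
    · exact le_trans (by simp) (ih _ _)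

theorem pv_core_succ (b f n : Nat) (l : List Char) : Nat.toDigitsCore b (f+1) n l =
    if n / b = 0 then Nat.digitChar (n % b) :: l
    else Nat.toDigitsCore b f (n / b) (Nat.digitChar (n % b) :: l) := rfl

-- str(i) has at least two characters for i ≥ 10
theorem pv_toChars_big {i : Int} (h : 10 ≤ i) (c : Char) : [c] ≠ PySem.Int.toChars i := by
  intro hc
  have h1 : PySem.Int.toChars i = Nat.toDigits 10 i.toNat := by
    simp [PySem.Int.toChars, show ¬ i < 0 by omega]
  obtain ⟨m, hm⟩ : ∃ m, i.toNat = m + 10 := ⟨i.toNat - 10, by omega⟩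
  have h2 : 2 ≤ (Nat.toDigits 10 (m + 10)).length := by
    unfold Nat.toDigits
    rw [pv_core_succ]
    rw [if_neg (by omega)]
    rw [show m + 10 = (m + 9) + 1 from rfl, pv_core_succ]
    split
    · simp
    · exact le_trans (by simp) (pv_lenCore _ _ _ _)
  rw [h1, hm] at hc
  rw [← hc] at h2; simp at h2

-- loop lemmas for A

theorem pvBuild_bad {n : Int} : ∀ {cs : List Char} (c : Char), c ∈ cs →
    ((pvVal? c = none ∨ ∃ d, pvVal? c = some d ∧ n ≤ d) →
    ∀ cnt, pvBuild n cs cnt = none) := by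
  intro cs
  induction cs with
  | nil => intro c hc; cases hc
  | cons c0 rest ih =>
    intro c hc hbad cnt
    unfold pvBuild
    cases hv : pvVal? c0 with
    | none => rfl
    | some d =>
      by_cases hd : d ≥ n
      · simp [hd]
      · simp only [hd, if_false]
        rcases List.mem_cons.mp hc with rfl | hmem
        · rcases hbad with h1 | ⟨d', hd', hnd'⟩
          · rw [hv] at h1; cases h1
          · rw [hv] at hd'; cases hd'; omega
        · exact ih c hmem hbad _

theorem pvBuild_good {n : Int} : ∀ (cs : List Char) (cnt : List Int),
    (∀ c ∈ cs, ∃ d, pvVal? c = some d ∧ 0 ≤ d ∧ d < n) → ((cnt.length : Int) = n) →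
    ∃ r, pvBuild n cs cnt = some r ∧ r.length = cnt.length ∧
      ∀ i : Nat, r.getD i 0 = cnt.getD i 0 + (cs.countP (fun c => pvVal? c == some (i : Int)) : Int) := by
  intro cs
  induction cs with
  | nil => intro cnt _ _; exact ⟨cnt, rfl, rfl, by simp⟩
  | cons c0 rest ih =>
    intro cnt hgood hlen
    obtain ⟨d, hv, hd0, hdn⟩ := hgood c0 (List.mem_cons_self ..)
    have hdlt : d.toNat < cnt.length := by omega
    unfold pvBuild
    simp only [hv]
    rw [if_neg (show ¬ d ≥ n by omega)]
    rw [PySem.List.pySetD_of_nonneg _ _ hd0,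
        PySem.List.pyGetD_eq_getElem _ _ hd0 (by omega)]
    set cnt' := cnt.set d.toNat (cnt[d.toNat] + 1) with hcnt'
    obtain ⟨r, hr, hrlen, hrget⟩ := ih cnt' (fun c hc => hgood c (List.mem_cons_of_mem _ hc))
      (by simp [hcnt', hlen])
    refine ⟨r, hr, by simp [hrlen, hcnt'], ?_⟩
    intro i
    rw [hrget i, List.countP_cons]
    by_cases hid : d = (i : Int)
    · have hieq : i = d.toNat := by omega
      subst hieq
      rw [List.getD_eq_getElem cnt' 0 (by rw [hcnt', List.length_set]; exact hdlt),
          List.getD_eq_getElem cnt 0 hdlt,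
          if_pos (show (pvVal? c0 == some ((d.toNat : Nat) : Int)) = true by simp [hv]; omega)]
      simp only [hcnt', List.getElem_set]
      push_cast
      ring
    · have hne : d.toNat ≠ i := by omega
      have hsame : cnt'.getD i 0 = cnt.getD i 0 := by
        by_cases hi : i < cnt.length
        · rw [List.getD_eq_getElem cnt' 0 (by rw [hcnt', List.length_set]; exact hi),
              List.getD_eq_getElem cnt 0 hi]
          simp [hcnt', hne]
        · rw [List.getD_eq_default cnt 0 (by omega),
              List.getD_eq_default cnt' 0 (by rw [hcnt', List.length_set]; omega)]
      rw [if_neg (show ¬ ((pvVal? c0 == some (i : Int)) = true) by simp [hv, hid]), hsame]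
      push_cast
      ring

theorem pvCheck_eq_all (cs : List Char) (cnt : List Int) : ∀ is,
    pvCheck cs cnt is = is.all
      (fun i => (pvVal? (PySem.List.pyGetD cs i ' ')).getD 0 == PySem.List.pyGetD cnt i 0) := by
  intro is
  induction is with
  | nil => rfl
  | cons i is ih =>
    unfold pvCheck
    rw [ih]
    by_cases h : (pvVal? (PySem.List.pyGetD cs i ' ')).getD 0 = PySem.List.pyGetD cnt i 0 <;>
      simp [h]

-- evaluation shape of port A (zeta-reduced, casts normalised)
theorem pv_eval_A (num : String) : autobiographical num =
    (match pvBuild (num.toList.length : Int) num.toList (List.replicate num.toList.length 0) with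
    | none => false
    | some cnt => pvCheck num.toList cnt (PySem.List.pyRange 0 (num.toList.length : Int) 1)) := by
  simp only [autobiographical, PySem.List.len_eq, PySem.List.pyRepeat_singleton, Int.toNat_natCast]

-- characterisation of B

theorem pvAlt_eq_true_iff (num : String) :
    autobiographical_alt num = true ↔ ∀ k : Nat, (hk : k < num.toList.length) →
      (pvVal? num.toList[k]).getD 0 =
        (num.toList.countP (fun d => decide ([d] = PySem.Int.toChars (k : Int))) : Int) := by
  unfold autobiographical_alt
  rw [List.all_eq_true]
  constructor
  · intro h k hk
    have hmem := h ((0 : Int) + k, num.toList[k])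
      ((PySem.List.mem_enumerate_iff _ _ _).mpr ⟨k, hk, rfl⟩)
    simp only [beq_iff_eq] at hmem
    rw [hmem]
    have heq : (fun d => if [d] = PySem.Int.toChars ((0 : Int) + (k : Int)) then (1 : Int) else 0)
        = (fun d => if (fun d => decide ([d] = PySem.Int.toChars ((k : Nat) : Int))) d = true then (1 : Int) else 0) := by
      funext d; simp
    rw [heq, PySem.List.sum_map_ite_one_zero]
  · intro h p hp
    obtain ⟨k, hk, rfl⟩ := (PySem.List.mem_enumerate_iff _ _ _).mp hp
    simp only [beq_iff_eq]
    have heq : (fun d => if [d] = PySem.Int.toChars ((0 : Int) + (k : Int)) then (1 : Int) else 0)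
        = (fun d => if (fun d => decide ([d] = PySem.Int.toChars ((k : Nat) : Int))) d = true then (1 : Int) else 0) := by
      funext d; simp
    rw [heq, PySem.List.sum_map_ite_one_zero]
    exact h k hk

-- the two per-position counts agree when every character is a (Dom) digit
theorem pv_count_eq (cs : List Char) (hdom : ∀ c ∈ cs, pvDomChar c = true)
    (hdig : ∀ c ∈ cs, PySem.Chars.isdigit c = true) (k : Nat) :
    cs.countP (fun c => pvVal? c == some (k : Int)) =
      cs.countP (fun d => decide ([d] = PySem.Int.toChars (k : Int))) := by
  apply List.countP_congr
  intro c hc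
  have hdomc := hdom c hc
  have hdigc := hdig c hc
  have hv : pvVal? c = some ((c.toNat : Int) - 48) := by
    rw [pv_val_of_dom hdomc, if_pos hdigc]
  obtain ⟨hb1, hb2⟩ := pv_digit_bounds hdigc
  have hlt : c.toNat < 128 := by omega
  simp only [hv, beq_iff_eq, Option.some.injEq, decide_eq_true_eq]
  constructor
  · intro hval
    rw [← hval, pv_toChars_digit hlt hdigc]
  · intro hch
    by_cases hk : 10 ≤ (k : Int)
    · exact absurd hch (pv_toChars_big hk c)
    · exact (pv_toChars_single (by omega) (by omega) hch.symm).2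

-- ===== VERDICT (by name: the statement is the Claim_ definition above) =====
theorem autobiographical_spec : Claim_equal_autobiographical := by
  intro num hdom hpre
  unfold Spec_autobiographical
  have hdomc : ∀ c ∈ num.toList, pvDomChar c = true := by
    simpa [pvDomStr, List.all_eq_true, Dom_autobiographical] using hdom
  by_cases hX : ∃ p, ∃ (hp : p < num.toList.length), PySem.Chars.isdigit num.toList[p] = true ∧
      (num.toList.length : Int) ≤ (num.toList[p].toNat : Int) - 48
  · -- some position holds a digit ≥ len(num): both programs return False
    obtain ⟨p, hp, hdig, hbig⟩ := hX
    have hv : pvVal? num.toList[p] = some ((num.toList[p].toNat : Int) - 48) := by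
      rw [pv_val_of_dom (hdomc _ (List.getElem_mem hp)), if_pos hdig]
    have hA : autobiographical num = false := by
      rw [pv_eval_A]
      rw [pvBuild_bad num.toList[p] (List.getElem_mem hp) (Or.inr ⟨_, hv, hbig⟩)]
    have hB : autobiographical_alt num = false := by
      cases hBv : autobiographical_alt num with
      | false => rfl
      | true =>
        exfalso
        have hk := (pvAlt_eq_true_iff num).mp hBv p hp
        rw [hv] at hk
        simp only [Option.getD_some] at hk
        have hle : num.toList.countP (fun d => decide ([d] = PySem.Int.toChars (p : Int)))
            ≤ num.toList.length := List.countP_le_length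
        have hall : ∀ d ∈ num.toList, decide ([d] = PySem.Int.toChars (p : Int)) = true := by
          apply List.countP_eq_length.mp
          omega
        have hself : [num.toList[p]] = PySem.Int.toChars (p : Int) := by
          simpa using hall num.toList[p] (List.getElem_mem hp)
        by_cases hp10 : 10 ≤ (p : Int)
        · exact pv_toChars_big hp10 num.toList[p] hself
        · have := (pv_toChars_single (by omega) (by omega) hself.symm).2
          omega
    rw [hA, hB]
  · -- no digit ≥ len(num): by Pre_ every character is a digit, each < len(num)
    have hdig : ∀ k, (hk : k < num.toList.length) → PySem.Chars.isdigit num.toList[k] = true := by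
      intro k hk
      by_contra hnd
      have hgd : PySem.Chars.isdigit (num.toList.getD k ' ') = false := by
        rw [List.getD_eq_getElem _ _ hk]
        simpa using hnd
      obtain ⟨j, hjk, hjd, hjv⟩ := hpre k hk hgd
      have hj : j < num.toList.length := lt_trans hjk hk
      rw [List.getD_eq_getElem _ _ hj] at hjd hjv
      exact hX ⟨j, hj, hjd, hjv⟩
    have hdigmem : ∀ c ∈ num.toList, PySem.Chars.isdigit c = true := by
      intro c hc
      obtain ⟨j, hj, rfl⟩ := List.mem_iff_getElem.mp hc
      exact hdig j hj
    have hgood : ∀ c ∈ num.toList, ∃ d, pvVal? c = some d ∧ 0 ≤ d ∧ d < (num.toList.length : Int) := by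
      intro c hc
      obtain ⟨k, hk, rfl⟩ := List.mem_iff_getElem.mp hc
      have hd := hdig k hk
      refine ⟨_, by rw [pv_val_of_dom (hdomc _ hc), if_pos hd], ?_, ?_⟩
      · have := (pv_digit_bounds hd).1; omega
      · by_contra hge
        exact hX ⟨k, hk, hd, by omega⟩
    obtain ⟨r, hr, hrlen, hrget⟩ :=
      pvBuild_good num.toList (List.replicate num.toList.length 0) hgood (by simp)
    have hrlen' : r.length = num.toList.length := by simpa using hrlen
    have hrep : ∀ i : Nat, (List.replicate num.toList.length (0:Int)).getD i 0 = 0 := by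
      intro i; by_cases hi : i < num.toList.length
      · rw [List.getD_eq_getElem _ _ (by simpa using hi)]; simp
      · rw [List.getD_eq_default _ _ (by simpa using hi)]
    have hcnt : ∀ k : Nat, k < num.toList.length → (r.getD k 0 : Int) =
        (num.toList.countP (fun d => decide ([d] = PySem.Int.toChars (k : Int))) : Int) := by
      intro k hk
      rw [hrget k, hrep k, pv_count_eq num.toList hdomc hdigmem k]
      ring
    rw [Bool.eq_iff_iff, pv_eval_A]
    simp only [hr]
    rw [pvCheck_eq_all, List.all_eq_true, pvAlt_eq_true_iff]
    constructor
    · intro h k hk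
      have hi := h (k : Int) ((PySem.List.mem_pyRange_one).mpr ⟨by omega, by omega⟩)
      rw [PySem.List.pyGetD_eq_getElem _ _ (by omega) (by exact_mod_cast hk),
          PySem.List.pyGetD_eq_getElem _ _ (by omega) (by rw [hrlen']; exact_mod_cast hk)] at hi
      simp only [Int.toNat_natCast, beq_iff_eq] at hi
      rw [hi, ← List.getD_eq_getElem _ _ (by rw [hrlen']; exact hk), hcnt k hk]
    · intro h i hi
      obtain ⟨hi0, hin⟩ := (PySem.List.mem_pyRange_one).mp hi
      have hk : i.toNat < num.toList.length := by omega
      have hkk := h i.toNat hk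
      rw [PySem.List.pyGetD_eq_getElem _ _ (by omega) (by exact_mod_cast hin),
          PySem.List.pyGetD_eq_getElem _ _ (by omega) (by rw [hrlen']; exact_mod_cast hin)]
      simp only [beq_iff_eq]
      rw [hkk, ← List.getD_eq_getElem _ _ (by rw [hrlen']; exact hk), hcnt i.toNat hk]
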